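-- pv_equiv track=rewrite | github.com/mabergerx/codesignal | arcade/exploringTheWaters/areSimilar.py | solution
-- ===== SOURCE A (Python) =====
-- def solution(a, b):
--     if a == b:
--         return True
--     elif sorted(a) == sorted(b):
--         amount_swaps = 0
--         for ela, elb in zip(a, b):
--             if ela != elb:
--                 amount_swaps += 1
--             if amount_swaps > 2:
--                 return False
--         return True
--     return False
-- ===== SOURCE B (Python) =====
-- def solution(a, b):
--     if len(a) != len(b):
--         return False
--     diff = [(x, y) for x, y in zip(a, b) if x != y]
--     if not diff:
--         return True
--     if len(diff) != 2:
--         return False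
--     (x1, y1), (x2, y2) = diff
--     return x1 == y2 and x2 == y1
-- ===== Notes on version B (the rewrite author's own statement) =====
-- stated objective: alternative
-- what changed: Replaces the sorted(a)==sorted(b) multiset check plus mismatch-counting loop with a single pass collecting the mismatched pairs and directly verifying that they form one swap; O(n) work instead of O(n log n), though CPython's C-level sort keeps wall-clock comparable.
import Mathlib
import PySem

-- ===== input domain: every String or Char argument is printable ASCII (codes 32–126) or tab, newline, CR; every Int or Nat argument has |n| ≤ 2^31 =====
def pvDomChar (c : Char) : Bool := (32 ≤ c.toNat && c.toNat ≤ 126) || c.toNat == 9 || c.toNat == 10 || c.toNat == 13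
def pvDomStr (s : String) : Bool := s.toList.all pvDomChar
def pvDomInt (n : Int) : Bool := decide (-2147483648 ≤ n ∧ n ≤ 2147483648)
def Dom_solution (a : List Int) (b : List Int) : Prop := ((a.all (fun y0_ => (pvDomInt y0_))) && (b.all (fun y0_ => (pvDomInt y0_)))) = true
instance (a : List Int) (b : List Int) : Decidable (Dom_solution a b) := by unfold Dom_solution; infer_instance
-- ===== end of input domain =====

-- B replaces A's sort-and-compare multiset test with a single pass over the
-- mismatched pairs, verifying directly that they form one swap (objective: alternative).

-- ===== PORT A =====
-- the for-loop over zip(a, b) with amount_swaps and the early 'return False'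
def solAloop : List (Int × Int) → Int → Bool
  | [], _ => true
  | (x, y) :: rest, c =>
    let c' := if x ≠ y then c + 1 else c
    if c' > 2 then false else solAloop rest c'

def solution (a : List Int) (b : List Int) : Bool :=
  if a = b then true
  else if PySem.List.sorted a (fun x => x) false = PySem.List.sorted b (fun x => x) false then
    solAloop (a.zip b) 0
  else false

-- ===== PORT B =====
def solution_alt (a : List Int) (b : List Int) : Bool :=
  if a.length ≠ b.length then false
  else
    match (a.zip b).filter (fun p => p.1 != p.2) with
    | [] => true
    | [(x1, y1), (x2, y2)] => x1 == y2 && x2 == y1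
    | _ => false

-- ===== PRECONDITION & SPEC =====
def Spec_solution (a : List Int) (b : List Int) (out : Bool) : Prop := out = solution_alt a b
instance (a : List Int) (b : List Int) (out : Bool) : Decidable (Spec_solution a b out) := by unfold Spec_solution; infer_instance

-- ===== CLAIM (what is proved, stated in full; the proofs are below) =====
def Claim_equal_solution : Prop := ∀ (a : List Int) (b : List Int), Dom_solution a b → Spec_solution a b (solution a b)

-- ===== LEMMAS AND PROOFS =====

-- filtering the self-zip for mismatches yields nothing
theorem zip_self_filter_nil (a : List Int) :
    (a.zip a).filter (fun p => p.1 != p.2) = [] := by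
  induction a with
  | nil => rfl
  | cons x t ih => simpa [List.zip_cons_cons, List.filter_cons] using ih

-- no mismatches and equal lengths means the lists are equal
theorem eq_of_filter_nil (a b : List Int) (hl : a.length = b.length)
    (h : (a.zip b).filter (fun p => p.1 != p.2) = []) : a = b := by
  induction a generalizing b with
  | nil => cases b <;> simp_all
  | cons x t ih =>
    cases b with
    | nil => simp_all
    | cons y s =>
      by_cases hxy : x = y
      · subst hxy
        simp only [List.zip_cons_cons, List.filter_cons, bne_self_eq_false] at h
        simp only [List.length_cons, Nat.add_right_cancel_iff] at hl
        rw [ih s hl h]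
      · simp [List.zip_cons_cons, hxy] at h

-- A's counting loop decides "at most 2 - c mismatches"
theorem solAloop_eq (l : List (Int × Int)) (c : Int) (hc : c ≤ 2) :
    solAloop l c = decide (((l.filter (fun p => p.1 != p.2)).length : Int) + c ≤ 2) := by
  induction l generalizing c with
  | nil => simp [solAloop, hc]
  | cons p t ih =>
    obtain ⟨x, y⟩ := p
    by_cases hxy : x = y
    · subst hxy
      have h2 : ¬ (x ≠ x) := fun h => h rfl
      have h3 : ¬ (c > 2) := by omega
      simp only [solAloop, h2, if_false, h3, List.filter_cons, bne_self_eq_false]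
      exact ih c hc
    · have hfilt : ((((x, y) :: t).filter (fun p => p.1 != p.2))) =
          (x, y) :: t.filter (fun p => p.1 != p.2) := by
        simp [hxy]
      simp only [solAloop, ne_eq, hxy, not_false_eq_true, if_true, hfilt, List.length_cons]
      by_cases hgt : c + 1 > 2
      · simp only [hgt, if_true]
        symm
        simp only [decide_eq_false_iff_not]
        have h0 : (0 : Int) ≤ ((t.filter (fun p => p.1 != p.2)).length : Int) :=
          Int.natCast_nonneg _
        push_cast
        omega
      · simp only [hgt, if_false]
        rw [ih (c + 1) (by omega)]
        simp only [decide_eq_decide]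
        push_cast
        omega

-- matching pairs of the zip have equal components, so a ~ b reduces to the mismatched pairs
theorem perm_iff_diff_perm (a b : List Int) (hl : a.length = b.length) :
    a.Perm b ↔
      (((a.zip b).filter (fun p => p.1 != p.2)).map Prod.fst).Perm
        (((a.zip b).filter (fun p => p.1 != p.2)).map Prod.snd) := by
  set l := a.zip b with hldef
  set f : Int × Int → Bool := fun p => p.1 != p.2 with hf
  have hsplit : (l.filter f ++ l.filter (fun p => !(f p))).Perm l :=
    List.filter_append_perm f l
  have ha : a = l.map Prod.fst := by
    rw [hldef, List.map_fst_zip (le_of_eq hl)]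
  have hb : b = l.map Prod.snd := by
    rw [hldef, List.map_snd_zip (ge_of_eq hl)]
  have hX : (l.filter (fun p => !(f p))).map Prod.fst =
      (l.filter (fun p => !(f p))).map Prod.snd := by
    apply List.map_congr_left
    intro p hp
    have := List.of_mem_filter hp
    simpa [hf] using this
  have hpa : a.Perm ((l.filter f).map Prod.fst ++ (l.filter (fun p => !(f p))).map Prod.fst) := by
    rw [ha, ← List.map_append]
    exact (hsplit.map Prod.fst).symm
  have hpb : b.Perm ((l.filter f).map Prod.snd ++ (l.filter (fun p => !(f p))).map Prod.fst) := by
    rw [hb, hX, ← List.map_append]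
    exact (hsplit.map Prod.snd).symm
  constructor
  · intro h
    have h2 := (hpa.symm.trans h).trans hpb
    exact (List.perm_append_right_iff _).mp h2
  · intro h
    exact (hpa.trans ((h.append_right _))).trans hpb.symm

-- two-element permutation characterisation
theorem perm_pair {p q r s : Int} (h : [p, q].Perm [r, s]) :
    (p = r ∧ q = s) ∨ (p = s ∧ q = r) := by
  have hp : p ∈ [r, s] := h.mem_iff.mp (by simp)
  rcases List.mem_cons.mp hp with h1 | h2
  · subst h1
    left
    refine ⟨rfl, ?_⟩
    have := (List.perm_cons p).mp h
    simpa using this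
  · have h1 : p = s := by simpa using h2
    subst h1
    right
    refine ⟨rfl, ?_⟩
    have hsw : ([r, p] : List Int).Perm [p, r] := List.Perm.swap _ _ _
    have := (List.perm_cons p).mp (h.trans hsw)
    simpa using this

-- ===== VERDICT (by name: the statement is the Claim_ definition above) =====
theorem solution_spec : Claim_equal_solution := by
  intro a b _
  unfold Spec_solution solution solution_alt
  by_cases hab : a = b
  · subst hab
    simp [zip_self_filter_nil]
  · simp only [if_neg hab]
    by_cases hlen : a.length = b.length
    · have hsorted_iff :
          PySem.List.sorted a (fun x => x) false = PySem.List.sorted b (fun x => x) false ↔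
            a.Perm b := PySem.List.sorted_id_eq_sorted_id_iff_perm a b
      have hiff := perm_iff_diff_perm a b hlen
      simp only [if_neg (fun h => (h : a.length ≠ b.length) hlen)]
      by_cases hperm : a.Perm b
      · have hs := hsorted_iff.mpr hperm
        simp only [if_pos hs]
        rw [solAloop_eq _ 0 (by norm_num)]
        have hdp := hiff.mp hperm
        rcases hd : (a.zip b).filter (fun p => p.1 != p.2) with _ | ⟨⟨x1, y1⟩, _ | ⟨⟨x2, y2⟩, _ | ⟨p3, rest⟩⟩⟩
        · exact absurd (eq_of_filter_nil a b hlen hd) hab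
        · exfalso
          rw [hd] at hdp
          have hxy : x1 = y1 := by simpa using hdp
          have hmem : (x1, y1) ∈ (a.zip b).filter (fun p => p.1 != p.2) := by
            rw [hd]; exact List.mem_cons_self ..
          have := List.of_mem_filter hmem
          simp [hxy] at this
        · rw [hd] at hdp
          simp only [List.map_cons, List.map_nil] at hdp
          rcases perm_pair hdp with ⟨h1, h2⟩ | ⟨h1, h2⟩
          · exfalso
            have hmem : (x1, y1) ∈ (a.zip b).filter (fun p => p.1 != p.2) := by
              rw [hd]; exact List.mem_cons_self ..
            have := List.of_mem_filter hmem
            simp [h1] at this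
          · rw [hd]
            simp [h1, h2]
        · rw [hd]
          have h3 : ¬ (((rest.length + 1 + 1 + 1 : Nat) : Int) + 0 ≤ 2) := by push_cast; omega
          simp only [List.length_cons, h3, decide_false]
      · have hs : PySem.List.sorted a (fun x => x) false ≠ PySem.List.sorted b (fun x => x) false :=
          fun h => hperm (hsorted_iff.mp h)
        simp only [if_neg hs]
        rcases hd : (a.zip b).filter (fun p => p.1 != p.2) with _ | ⟨⟨x1, y1⟩, _ | ⟨⟨x2, y2⟩, _ | ⟨p3, rest⟩⟩⟩
        · exact absurd (eq_of_filter_nil a b hlen hd) hab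
        · rw [hd]
        · rw [hd]
          by_cases h1 : x1 = y2
          · by_cases h2 : x2 = y1
            · exfalso
              apply hperm
              apply hiff.mpr
              rw [hd]
              simp only [List.map_cons, List.map_nil, h1, h2]
              exact List.Perm.swap _ _ _
            · simp [h2]
          · simp [h1]
        · rw [hd]
    · have hsne : PySem.List.sorted a (fun x => x) false ≠ PySem.List.sorted b (fun x => x) false :=
        fun h => hlen ((PySem.List.sorted_id_eq_sorted_id_iff_perm a b).mp h).length_eq
      simp [hsne, hlen]
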